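-- pv_equiv track=rewrite | github.com/vitusli/4.5 | extensions/user_default/memsaver_personal/image_sizer.py | find_sequence_num_indices
-- ===== SOURCE A (Python) =====
-- import typing
--
-- def find_sequence_num_indices(filename: str) -> typing.Tuple[int, int]:
--     """Returns tuple (num_start, num_end) with indices of the first (last) digit of sequence number.
--
--     Returns (-1, -1) if the filename doesn't contain sequence number.
--     """
--     # Blender is very robust when considering sequence numbers, it iterates through filename
--     # from end to start and the first numeric sequence found is considered to be the sequence number:
--     # https://github.com/blender/blender/blob/36983fb5e4a297cb26855b6777a7ce25c12d7c49/source/blender/blenlib/intern/path_util.c#L70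
--     num_start, num_end = -1, -1
--     found_digit = False
--     for i in range(len(filename) - 1, -1, -1):
--         if filename[i].isdigit():
--             if found_digit:
--                 num_start = i
--             else:
--                 found_digit = True
--                 num_start, num_end = i, i
--         elif found_digit:
--             break
--
--     return (num_start, num_end)
-- ===== SOURCE B (Python) =====
-- def find_sequence_num_indices(filename):
--     """Forward one-pass: track the current digit run's start; each time a run
--     closes, remember it as the (so far) last run. Returns the last run's
--     (first, last) digit indices, or (-1, -1) if there are no digits."""
--     last = (-1, -1)
--     start = None
--     for i, ch in enumerate(filename):
--         if ch.isdigit():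
--             if start is None:
--                 start = i
--         else:
--             if start is not None:
--                 last = (start, i - 1)
--                 start = None
--     if start is not None:
--         last = (start, len(filename) - 1)
--     return last
-- ===== Notes on version B (the rewrite author's own statement) =====
-- stated objective: alternative
-- what changed: Replaces A's backward index scan with early break by a forward single pass that tracks the open digit run's start and remembers the most recently closed run.
import Mathlib
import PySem

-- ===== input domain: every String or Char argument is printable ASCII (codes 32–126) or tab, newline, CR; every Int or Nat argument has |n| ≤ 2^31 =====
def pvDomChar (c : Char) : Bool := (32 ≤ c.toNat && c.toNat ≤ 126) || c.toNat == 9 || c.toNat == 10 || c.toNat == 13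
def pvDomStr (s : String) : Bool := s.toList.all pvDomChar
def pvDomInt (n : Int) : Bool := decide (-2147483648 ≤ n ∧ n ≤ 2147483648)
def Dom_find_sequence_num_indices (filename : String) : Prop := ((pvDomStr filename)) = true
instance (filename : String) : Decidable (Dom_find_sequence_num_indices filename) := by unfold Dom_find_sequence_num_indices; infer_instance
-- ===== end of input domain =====

-- B replaces A's backward scan (with early break) by a forward single pass that
-- remembers the most recently closed digit run (objective: alternative, same cost).

-- ===== PORT A =====
-- A's loop: for i in range(len-1, -1, -1), state (num_start, num_end, found_digit);
-- `filename[i]` is in range for every visited i, ported as `s.getD i ' '`;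
-- '.isdigit' on one printable-ASCII char is exactly Char.isDigit.
def pvLoopA (s : List Char) : Nat → Int → Int → Bool → Int × Int
  | 0, ns, ne, _ => (ns, ne)
  | i+1, ns, ne, fd =>
    if (s.getD i ' ').isDigit then
      if fd then pvLoopA s i (i : Int) ne fd
      else pvLoopA s i (i : Int) (i : Int) true
    else if fd then (ns, ne)                -- the `break`
    else pvLoopA s i ns ne fd

def find_sequence_num_indices (filename : String) : Int × Int :=
  pvLoopA filename.toList filename.toList.length (-1) (-1) false

-- ===== PORT B =====
-- B's loop: forward over (i, ch) with state (start : Option, last); the trailing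
-- `if start is not None: last = (start, len-1)` is the `[]` case with i = len.
def pvLoopB : List Char → Int → Option Int → Int × Int → Int × Int
  | [], i, some s, _ => (s, i - 1)
  | [], _, none, last => last
  | c :: rest, i, st, last =>
    if c.isDigit then
      pvLoopB rest (i+1) (match st with | none => some i | some s => some s) last
    else
      match st with
      | some s => pvLoopB rest (i+1) none (s, i - 1)
      | none => pvLoopB rest (i+1) none last

def find_sequence_num_indices_alt (filename : String) : Int × Int :=
  pvLoopB filename.toList 0 none (-1, -1)

-- ===== PRECONDITION & SPEC =====
def Spec_find_sequence_num_indices (filename : String) (out : Int × Int) : Prop := out = find_sequence_num_indices_alt filename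
instance (filename : String) (out : Int × Int) : Decidable (Spec_find_sequence_num_indices filename out) := by unfold Spec_find_sequence_num_indices; infer_instance

-- ===== CLAIM (what is proved, stated in full; the proofs are below) =====
def Claim_equal_find_sequence_num_indices : Prop := ∀ (filename : String), Dom_find_sequence_num_indices filename → Spec_find_sequence_num_indices filename (find_sequence_num_indices filename)

-- ===== LEMMAS AND PROOFS =====

-- A's loop re-expressed over the reversed prefix (c processed at position rest.length)
def pvRevA : List Char → Int → Int → Bool → Int × Int
  | [], ns, ne, _ => (ns, ne)
  | c :: rest, ns, ne, fd =>
    if c.isDigit then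
      if fd then pvRevA rest (rest.length : Int) ne fd
      else pvRevA rest (rest.length : Int) (rest.length : Int) true
    else if fd then (ns, ne)
    else pvRevA rest ns ne fd

lemma loopA_eq_revA (s : List Char) :
    ∀ (i : Nat), i ≤ s.length → ∀ ns ne fd,
      pvLoopA s i ns ne fd = pvRevA ((s.take i).reverse) ns ne fd := by
  intro i
  induction i with
  | zero => intro _ ns ne fd; simp [pvLoopA, pvRevA]
  | succ i ih =>
    intro hle ns ne fd
    have hi : i < s.length := Nat.lt_of_succ_le hle
    have htake : (s.take (i+1)).reverse = s[i] :: (s.take i).reverse := by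
      rw [List.take_add_one, List.getElem?_eq_getElem hi]; simp
    have hget : s.getD i ' ' = s[i] := List.getD_eq_getElem _ _ hi
    have hlen : ((s.take i).reverse).length = i := by
      simp [Nat.min_eq_left (Nat.le_of_lt hi)]
    rw [htake]
    simp only [pvLoopA, pvRevA, hget, hlen]
    split_ifs with h1 h2 <;>
      first
      | exact ih (Nat.le_of_lt hi) _ _ _
      | rfl

-- the last maximal digit run, read off the reversed list
def lastRunR (rs : List Char) : Int × Int :=
  if (rs.dropWhile (fun c => !c.isDigit)).isEmpty then (-1, -1)
  else (((rs.dropWhile (fun c => !c.isDigit)).length : Int)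
          - ((rs.dropWhile (fun c => !c.isDigit)).takeWhile (fun c => c.isDigit)).length,
        ((rs.dropWhile (fun c => !c.isDigit)).length : Int) - 1)

lemma revA_true : ∀ (rs : List Char) (ne : Int),
    pvRevA rs (rs.length : Int) ne true
      = ((rs.length : Int) - (rs.takeWhile (fun c => c.isDigit)).length, ne) := by
  intro rs
  induction rs with
  | nil => intro ne; simp [pvRevA]
  | cons c rest ih =>
    intro ne
    by_cases h : c.isDigit
    · simp [pvRevA, h, ih ne]
    · simp [pvRevA, h]

lemma revA_spec : ∀ (rs : List Char),
    pvRevA rs (-1) (-1) false = lastRunR rs := by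
  intro rs
  induction rs with
  | nil => simp [pvRevA, lastRunR]
  | cons c rest ih =>
    by_cases h : c.isDigit
    · simp only [pvRevA, h, if_true, if_false, Bool.false_eq_true, lastRunR,
        List.dropWhile_cons]
      rw [revA_true]
      simp [h]
    · simp only [pvRevA, h, lastRunR, List.dropWhile_cons]
      simp [ih, lastRunR]

-- what B's loop computes, as a function of the remaining input and the state
def pvSpecB (cs : List Char) (i : Int) (st : Option Int) (last : Int × Int) : Int × Int :=
  if (cs.reverse.dropWhile (fun c => !c.isDigit)).isEmpty then
    (match st with | some s => (s, i - 1) | none => last)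
  else if ((cs.reverse.dropWhile (fun c => !c.isDigit)).takeWhile (fun c => c.isDigit)).length
          = (cs.reverse.dropWhile (fun c => !c.isDigit)).length then
    ((match st with | some s => s | none => i),
      i + ((cs.reverse.dropWhile (fun c => !c.isDigit)).length : Int) - 1)
  else (i + ((cs.reverse.dropWhile (fun c => !c.isDigit)).length : Int)
          - ((cs.reverse.dropWhile (fun c => !c.isDigit)).takeWhile (fun c => c.isDigit)).length,
        i + ((cs.reverse.dropWhile (fun c => !c.isDigit)).length : Int) - 1)

lemma loopB_spec : ∀ (cs : List Char) (i : Int) (st : Option Int) (last : Int × Int),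
    pvLoopB cs i st last = pvSpecB cs i st last := by
  intro cs
  induction cs with
  | nil =>
    intro i st last
    cases st <;> simp [pvLoopB, pvSpecB]
  | cons c cs' ih =>
    intro i st last
    have hrw : (c :: cs').reverse = cs'.reverse ++ [c] := by simp
    have hle : ((cs'.reverse.dropWhile (fun c => !c.isDigit)).takeWhile
        (fun c => c.isDigit)).length ≤ (cs'.reverse.dropWhile (fun c => !c.isDigit)).length :=
      (List.takeWhile_prefix _).length_le
    by_cases hc : c.isDigit
    · have hstep : pvLoopB (c :: cs') i st last
          = pvLoopB cs' (i+1) (match st with | none => some i | some s => some s) last := by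
        cases st <;> simp [pvLoopB, hc]
      rw [hstep, ih]
      by_cases h0 : (cs'.reverse.dropWhile (fun c => !c.isDigit)).isEmpty
      · cases st <;>
          simp [pvSpecB, hrw, List.dropWhile_append, h0, hc]
      · by_cases hEq : ((cs'.reverse.dropWhile (fun c => !c.isDigit)).takeWhile
            (fun c => c.isDigit)).length = (cs'.reverse.dropWhile (fun c => !c.isDigit)).length
        · cases st <;>
            simp [pvSpecB, hrw, List.dropWhile_append, List.takeWhile_append, h0, hEq, hc] <;>
            omega
        · have hne2 : ((cs'.reverse.dropWhile (fun c => !c.isDigit)).takeWhile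
              (fun c => c.isDigit)).length
              ≠ (cs'.reverse.dropWhile (fun c => !c.isDigit)).length + 1 := by omega
          cases st <;>
            simp [pvSpecB, hrw, List.dropWhile_append, List.takeWhile_append, h0, hEq, hne2] <;>
            omega
    · have hstep : pvLoopB (c :: cs') i st last
          = pvLoopB cs' (i+1) none
              (match st with | some s => (s, i - 1) | none => last) := by
        cases st <;> simp [pvLoopB, hc]
      rw [hstep, ih]
      by_cases h0 : (cs'.reverse.dropWhile (fun c => !c.isDigit)).isEmpty
      · cases st <;>
          simp [pvSpecB, hrw, List.dropWhile_append, h0, hc]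
      · by_cases hEq : ((cs'.reverse.dropWhile (fun c => !c.isDigit)).takeWhile
            (fun c => c.isDigit)).length = (cs'.reverse.dropWhile (fun c => !c.isDigit)).length
        · cases st <;>
            simp [pvSpecB, hrw, List.dropWhile_append, List.takeWhile_append, h0, hEq, hc] <;>
            omega
        · have hne2 : ((cs'.reverse.dropWhile (fun c => !c.isDigit)).takeWhile
              (fun c => c.isDigit)).length
              ≠ (cs'.reverse.dropWhile (fun c => !c.isDigit)).length + 1 := by omega
          cases st <;>
            simp [pvSpecB, hrw, List.dropWhile_append, List.takeWhile_append, h0, hEq, hne2] <;>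
            omega

-- bridge: B's spec at the initial state is A's last-run reading
lemma specB_init (cs : List Char) :
    pvSpecB cs 0 none (-1, -1) = lastRunR cs.reverse := by
  by_cases h : (cs.reverse.dropWhile (fun c => !c.isDigit)).isEmpty
  · simp [pvSpecB, lastRunR, h]
  · by_cases hEq : ((cs.reverse.dropWhile (fun c => !c.isDigit)).takeWhile
        (fun c => c.isDigit)).length = (cs.reverse.dropWhile (fun c => !c.isDigit)).length
    · simp [pvSpecB, lastRunR, h, hEq]
    · simp [pvSpecB, lastRunR, h, hEq]

-- ===== VERDICT (by name: the statement is the Claim_ definition above) =====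
theorem find_sequence_num_indices_spec : Claim_equal_find_sequence_num_indices := by
  intro filename _
  show _ = _
  unfold find_sequence_num_indices find_sequence_num_indices_alt
  rw [loopA_eq_revA _ _ (Nat.le_refl _), List.take_length, loopB_spec, specB_init,
    revA_spec]
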